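-- pv_equiv track=rewrite | github.com/jmcrook/CorpusLinguisticsLab | Old/mean_mode.py | get_spacings
-- ===== SOURCE A (Python) =====
-- def get_spacings(w_lst1, word):
--
--     spacings = []
--
--     for w in range(len(w_lst1)):
--         if w_lst1[w] == word:
--             count = 0
--             for i in range(len(w_lst1) - (w + 1)):
--                 if w_lst1[w+1+i] == word:
--                     spacings.append(count)
--                     count = 0
--                 else:
--                     count += 1
--
--     return spacings
-- ===== SOURCE B (Python) =====
-- def get_spacings(w_lst1, word):
--     # positions of the word (C-level index scan), gap list between consecutive
--     # occurrences; each occurrence contributes the suffix of gaps starting at it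
--     pos = []
--     i = -1
--     while True:
--         try:
--             i = w_lst1.index(word, i + 1)
--         except ValueError:
--             break
--         pos.append(i)
--     gaps = [b - a - 1 for a, b in zip(pos, pos[1:])]
--     out = []
--     for j in range(len(pos)):
--         out += gaps[j:]
--     return out
-- ===== Notes on version B (the rewrite author's own statement) =====
-- stated objective: alternative
-- what changed: A rescans the whole rest of the list for every occurrence of the word; B finds all occurrence positions with repeated list.index, builds the gap list between consecutive occurrences once, and emits the suffix of that gap list for each occurrence.
import Mathlib
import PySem

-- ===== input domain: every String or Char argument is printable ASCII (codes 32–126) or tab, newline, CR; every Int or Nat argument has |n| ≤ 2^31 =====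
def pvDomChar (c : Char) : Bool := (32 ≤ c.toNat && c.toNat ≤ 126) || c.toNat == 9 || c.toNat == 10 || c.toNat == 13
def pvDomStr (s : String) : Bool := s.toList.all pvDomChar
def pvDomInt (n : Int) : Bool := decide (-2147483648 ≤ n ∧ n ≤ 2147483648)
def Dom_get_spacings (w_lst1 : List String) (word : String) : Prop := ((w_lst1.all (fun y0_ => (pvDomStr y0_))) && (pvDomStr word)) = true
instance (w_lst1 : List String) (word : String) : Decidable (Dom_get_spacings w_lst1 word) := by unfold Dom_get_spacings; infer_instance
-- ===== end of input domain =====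

-- B replaces A's per-occurrence rescans with one position scan plus a gap list whose suffixes are emitted per occurrence (objective: alternative algorithm).

-- ===== PORT A =====
-- literal port of A: outer index loop, inner index loop with (spacings, count) state
def get_spacings (w_lst1 : List String) (word : String) : List Int :=
  (PySem.List.pyRange 0 (PySem.List.len w_lst1) 1).foldl
    (fun spacings w =>
      if PySem.List.pyGetD w_lst1 w "" == word then
        ((PySem.List.pyRange 0 (PySem.List.len w_lst1 - (w + 1)) 1).foldl
          (fun (st : List Int × Int) i =>
            if PySem.List.pyGetD w_lst1 (w + 1 + i) "" == word then (st.1 ++ [st.2], (0 : Int))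
            else (st.1, st.2 + 1))
          (spacings, 0)).1
      else spacings)
    []

-- ===== PORT B =====
-- helper for B: models the `while True: i = w_lst1.index(word, i+1)` loop;
-- list.index(word, s) is exact as `s + index of word in the suffix dropped at s`,
-- so each step searches the dropped suffix and offsets by `base`
def posScan (word : String) (xs : List String) (base : Int) : List Int :=
  match h : PySem.List.index? xs word with
  | none => []
  | some k => (base + (k : Int)) :: posScan word (xs.drop (k + 1)) (base + (k : Int) + 1)
termination_by xs.length
decreasing_by
  obtain ⟨hk, -⟩ := PySem.List.getElem_of_index?_eq_some h
  simp
  omega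

-- port of B: position list, zip-comprehension gap list, then `out += gaps[j:]` per position
def get_spacings_alt (w_lst1 : List String) (word : String) : List Int :=
  let pos := posScan word w_lst1 0
  let gaps := (pos.zip (PySem.List.slice pos (some 1) none)).map (fun ab => ab.2 - ab.1 - 1)
  (PySem.List.pyRange 0 (PySem.List.len pos) 1).foldl
    (fun out j => out ++ PySem.List.slice gaps (some j) none) []

-- ===== PRECONDITION & SPEC =====
def Spec_get_spacings (w_lst1 : List String) (word : String) (out : List Int) : Prop := out = get_spacings_alt w_lst1 word
instance (w_lst1 : List String) (word : String) (out : List Int) : Decidable (Spec_get_spacings w_lst1 word out) := by unfold Spec_get_spacings; infer_instance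

-- ===== CLAIM (what is proved, stated in full; the proofs are below) =====
def Claim_equal_get_spacings : Prop := ∀ (w_lst1 : List String) (word : String), Dom_get_spacings w_lst1 word → Spec_get_spacings w_lst1 word (get_spacings w_lst1 word)

-- ===== LEMMAS AND PROOFS =====

-- the inner-loop step of A, named for the proofs
def innerStep (word : String) (st : List Int × Int) (x : String) : List Int × Int :=
  if x == word then (st.1 ++ [st.2], (0 : Int)) else (st.1, st.2 + 1)

-- recursive characterisation of A's inner loop output (the gap list of a suffix, seeded with count c)
def F (word : String) (xs : List String) (c : Int) : List Int :=
  match xs with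
  | [] => []
  | x :: t => if x == word then c :: F word t 0 else F word t (c + 1)

-- B's `gaps` state for a suffix
def gList (word : String) (xs : List String) : List Int :=
  match xs with
  | [] => []
  | x :: t => if x == word then (0 : Int) :: gList word t
              else match gList word t with
                   | [] => []
                   | g :: gs => (g + 1) :: gs

-- B's `out` state for a suffix
def fRec (word : String) (xs : List String) : List Int :=
  match xs with
  | [] => []
  | x :: t => if x == word then gList word t ++ fRec word t else fRec word t

def addHead (c : Int) (l : List Int) : List Int :=
  match l with
  | [] => []
  | g :: gs => (c + g) :: gs

theorem F_eq_addHead_gList (word : String) (xs : List String) (c : Int) :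
    F word xs c = addHead c (gList word xs) := by
  induction xs generalizing c with
  | nil => rfl
  | cons x t ih =>
    simp only [F, gList]
    by_cases h : (x == word) = true
    · simp only [h, if_true, ih 0, addHead]
      cases hg : gList word t with
      | nil => simp
      | cons g gs => simp
    · simp only [h, ih (c + 1)]
      cases hg : gList word t with
      | nil => simp [addHead]
      | cons g gs => simp [addHead]; ring

theorem F_zero (word : String) (xs : List String) : F word xs 0 = gList word xs := by
  rw [F_eq_addHead_gList]
  cases gList word xs with
  | nil => rfl
  | cons g gs => simp [addHead]

-- A's inner loop, as a fold over the suffix list, appends F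
theorem inner_fold (word : String) (xs : List String) (sp : List Int) (c : Int) :
    (xs.foldl (innerStep word) (sp, c)).1 = sp ++ F word xs c := by
  induction xs generalizing sp c with
  | nil => simp [F]
  | cons x t ih =>
    simp only [List.foldl, innerStep, F]
    by_cases h : (x == word) = true
    · simp [h, ih]
    · simp [h, ih]

-- reading the full list past a prefix is reading the suffix
theorem pyGetD_append_left (pre ys : List String) (j : Int) (hj : 0 ≤ j) (d : String) :
    PySem.List.pyGetD (pre ++ ys) ((pre.length : Int) + j) d = PySem.List.pyGetD ys j d := by
  obtain ⟨k, rfl⟩ := Int.eq_ofNat_of_zero_le hj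
  have h1 : (pre.length : Int) + (k : Int) = ((pre.length + k : Nat) : Int) := by push_cast; ring
  rw [h1, PySem.List.pyGetD_natCast, PySem.List.pyGetD_natCast]
  simp [List.getD, List.getElem?_append_right]

-- the outer loop of A's port, walked down the list
theorem outer_fold (word : String) (pre xs : List String) (acc : List Int) :
    (PySem.List.pyRange (pre.length) ((pre.length : Int) + xs.length) 1).foldl
      (fun spacings w =>
        if PySem.List.pyGetD (pre ++ xs) w "" == word then
          ((PySem.List.pyRange 0 (PySem.List.len (pre ++ xs) - (w + 1)) 1).foldl
            (fun (st : List Int × Int) i =>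
              if PySem.List.pyGetD (pre ++ xs) (w + 1 + i) "" == word then (st.1 ++ [st.2], (0 : Int))
              else (st.1, st.2 + 1))
            (spacings, 0)).1
        else spacings)
      acc = acc ++ fRec word xs := by
  induction xs generalizing pre acc with
  | nil => simp [fRec]
  | cons x t ih =>
    have hcons : PySem.List.pyRange (pre.length) ((pre.length : Int) + (x :: t).length) 1
        = (pre.length : Int) :: PySem.List.pyRange ((pre.length : Int) + 1) ((pre.length : Int) + (x :: t).length) 1 := by
      apply PySem.List.pyRange_one_cons
      simp
    rw [hcons]
    simp only [List.foldl_cons]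
    have hget : PySem.List.pyGetD (pre ++ x :: t) (pre.length : Int) "" = x := by
      have h0 := pyGetD_append_left pre (x :: t) 0 le_rfl ""
      simp only [add_zero] at h0
      rw [h0, PySem.List.pyGetD_zero_cons]
    have hlen : PySem.List.len (pre ++ x :: t) - ((pre.length : Int) + 1) = (t.length : Int) := by
      simp only [PySem.List.len_eq, List.length_append, List.length_cons]
      push_cast
      ring
    have hinner : ∀ (sp : List Int),
        ((PySem.List.pyRange 0 (PySem.List.len (pre ++ x :: t) - ((pre.length : Int) + 1)) 1).foldl
          (fun (st : List Int × Int) i =>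
            if PySem.List.pyGetD (pre ++ x :: t) ((pre.length : Int) + 1 + i) "" == word then (st.1 ++ [st.2], (0 : Int))
            else (st.1, st.2 + 1))
          (sp, 0)).1 = sp ++ F word t 0 := by
      intro sp
      rw [hlen]
      have hcong : (PySem.List.pyRange 0 (t.length : Int) 1).foldl
          (fun (st : List Int × Int) i =>
            if PySem.List.pyGetD (pre ++ x :: t) ((pre.length : Int) + 1 + i) "" == word then (st.1 ++ [st.2], (0 : Int))
            else (st.1, st.2 + 1)) (sp, 0)
          = (PySem.List.pyRange 0 (t.length : Int) 1).foldl
          (fun (st : List Int × Int) i =>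
            innerStep word st (PySem.List.pyGetD t i "")) (sp, 0) := by
        apply PySem.List.foldl_congr_mem
        intro st i hi
        have hi' : 0 ≤ i := (PySem.List.mem_pyRange_one.1 hi).1
        have heq : PySem.List.pyGetD (pre ++ x :: t) ((pre.length : Int) + 1 + i) ""
            = PySem.List.pyGetD t i "" := by
          have h2 : ((pre.length : Int) + 1 + i) = (((pre ++ [x]).length : Int) + i) := by
            simp
          rw [h2]
          have := pyGetD_append_left (pre ++ [x]) t i hi' ""
          simpa using this
        rw [heq]
        rfl
      rw [hcong]
      rw [PySem.List.foldl_pyRange_zero_pyGetD' t "" (innerStep word) ((sp, (0 : Int)))]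
      exact inner_fold word t sp 0
    have hre : (pre.length : Int) + ((x :: t).length : Int) = (((pre ++ [x]).length : Int)) + (t.length : Int) := by
      simp
      ring
    have hpre1 : (pre.length : Int) + 1 = ((pre ++ [x]).length : Int) := by simp
    by_cases h : (x == word) = true
    · simp only [hget, h, if_true]
      rw [hinner acc, hre, hpre1]
      have := ih (pre ++ [x]) (acc ++ F word t 0)
      simp only [List.append_assoc, List.singleton_append] at this
      rw [this]
      simp [fRec, h, F_zero]
    · simp only [hget, h, Bool.false_eq_true, if_false]
      rw [hre, hpre1]
      have := ih (pre ++ [x]) acc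
      simp only [List.append_assoc, List.singleton_append] at this
      rw [this]
      simp [fRec, h]

-- occurrence indices of `word`, as Ints
def pInt (word : String) (xs : List String) : List Int :=
  match xs with
  | [] => []
  | x :: t => if x == word then (0 : Int) :: (pInt word t).map (· + 1)
              else (pInt word t).map (· + 1)

-- consecutive differences minus one (the gap list of a position list)
def Dg (q : List Int) : List Int := (q.zip q.tail).map (fun ab => ab.2 - ab.1 - 1)

-- concatenation of the suffixes of the gap list, one per position
def OutOf (q : List Int) : List Int :=
  (List.range q.length).flatMap (fun j => (Dg q).drop j)

theorem pInt_of_not_mem (word : String) (xs : List String) (h : word ∉ xs) :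
    pInt word xs = [] := by
  induction xs with
  | nil => rfl
  | cons x t ih =>
    simp only [List.mem_cons, not_or] at h
    have hx : (x == word) = false := by
      simp only [beq_eq_false_iff_ne]
      exact fun he => h.1 he.symm
    simp [pInt, hx, ih h.2]

theorem pInt_append (word : String) (pre suf : List String) (h : word ∉ pre) :
    pInt word (pre ++ word :: suf)
      = (pre.length : Int) :: (pInt word suf).map (· + ((pre.length : Int) + 1)) := by
  induction pre with
  | nil => simp [pInt]
  | cons y pre ih =>
    simp only [List.mem_cons, not_or] at h
    have hy : (y == word) = false := by
      simp only [beq_eq_false_iff_ne]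
      exact fun he => h.1 he.symm
    simp only [List.cons_append, pInt, hy, Bool.false_eq_true, if_false, ih h.2,
      List.map_cons, List.map_map, List.length_cons]
    refine List.cons_eq_cons.mpr ⟨by push_cast; ring, ?_⟩
    apply List.map_congr_left
    intro a _
    simp only [Function.comp_apply]
    push_cast
    ring

theorem posScan_eq (word : String) (n : Nat) :
    ∀ (xs : List String), xs.length ≤ n → ∀ (base : Int),
      posScan word xs base = (pInt word xs).map (· + base) := by
  induction n with
  | zero =>
    intro xs hlen base
    have : xs = [] := List.length_eq_zero_iff.1 (Nat.le_zero.1 hlen)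
    subst this
    rw [posScan]
    rfl
  | succ n ih =>
    intro xs hlen base
    rw [posScan]
    split
    · rename_i hidx
      rw [PySem.List.index?_eq_none_iff] at hidx
      rw [pInt_of_not_mem word xs hidx]
      rfl
    · rename_i k hidx
      obtain ⟨pre, suf, hxs, hk, hpre⟩ := (PySem.List.index?_eq_some_iff _ _ _).1 hidx
      subst hxs
      have hdrop : (pre ++ word :: suf).drop (k + 1) = suf := by
        have hsplit : pre ++ word :: suf = (pre ++ [word]) ++ suf := by simp
        rw [hsplit]
        apply List.drop_left'
        simp [hk]
      have hsuf : suf.length ≤ n := by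
        have := hlen
        simp only [List.length_append, List.length_cons] at this
        omega
      rw [hdrop, ih suf hsuf (base + (k : Int) + 1), pInt_append word pre suf hpre, hk]
      simp only [List.map_cons, List.map_map]
      refine List.cons_eq_cons.mpr ⟨by ring, ?_⟩
      apply List.map_congr_left
      intro a _
      simp only [Function.comp_apply]
      ring

theorem Dg_map_add (q : List Int) (c : Int) : Dg (q.map (· + c)) = Dg q := by
  simp only [Dg, List.map_tail.symm, List.zip_map, List.map_map]
  apply List.map_congr_left
  intro ab _
  simp

theorem Dg_cons_cons (a b : Int) (r : List Int) :
    Dg (a :: b :: r) = (b - a - 1) :: Dg (b :: r) := by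
  simp [Dg]

theorem gList_eq_Dg (word : String) (t : List String) :
    gList word t = Dg ((-1) :: pInt word t) := by
  induction t with
  | nil => rfl
  | cons x t ih =>
    by_cases h : (x == word) = true
    · simp only [gList, pInt, h, if_true]
      have h1 : (0 : Int) :: (pInt word t).map (· + 1) = ((-1 : Int) :: pInt word t).map (· + 1) := by
        simp
      rw [Dg_cons_cons, h1, Dg_map_add, ih]
      norm_num
    · simp only [gList, pInt, h, Bool.false_eq_true, if_false]
      cases hp : pInt word t with
      | nil =>
        rw [hp] at ih
        simp [ih, Dg]
      | cons p r =>
        rw [hp] at ih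
        rw [Dg_cons_cons] at ih
        simp only [List.map_cons, Dg_cons_cons, ih]
        have h2 : (p + 1 : Int) :: r.map (· + 1) = ((p :: r).map (· + 1)) := by simp
        rw [h2, Dg_map_add]
        congr 1
        ring

theorem fRec_eq_OutOf (word : String) (xs : List String) :
    fRec word xs = OutOf (pInt word xs) := by
  induction xs with
  | nil => rfl
  | cons x t ih =>
    by_cases h : (x == word) = true
    · simp only [fRec, pInt, h, if_true]
      cases hp : pInt word t with
      | nil =>
        rw [hp] at ih
        have hg : gList word t = [] := by
          rw [gList_eq_Dg, hp]
          rfl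
        simp [ih, hg, OutOf, Dg]
      | cons p r =>
        have hmapc : ((p :: r).map (· + 1) : List Int) = (p + 1) :: r.map (· + 1) := by simp
        have hg : gList word t = (p + 1 - 0 - 1) :: Dg (p :: r) := by
          rw [gList_eq_Dg, hp, Dg_cons_cons]
          congr 1
          ring
        have hdg : Dg ((0 : Int) :: (p + 1) :: r.map (· + 1)) = (p + 1 - 0 - 1) :: Dg (p :: r) := by
          rw [Dg_cons_cons, ← hmapc, Dg_map_add]
        rw [hmapc]
        unfold OutOf
        rw [hdg]
        simp only [List.length_cons, List.length_map]
        rw [List.range_succ_eq_map]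
        simp only [List.flatMap_cons, List.flatMap_map, List.drop_zero, List.drop_succ_cons]
        rw [hg, ih, hp]
        unfold OutOf
        simp only [List.length_cons]
    · simp only [fRec, pInt, h, Bool.false_eq_true, if_false, ih, OutOf,
        List.length_map, Dg_map_add]

-- B's port unfolded to OutOf of the occurrence indices
theorem alt_eq (w_lst1 : List String) (word : String) :
    get_spacings_alt w_lst1 word = OutOf (pInt word w_lst1) := by
  unfold get_spacings_alt
  dsimp only
  rw [posScan_eq word w_lst1.length w_lst1 le_rfl 0]
  have hmap : (pInt word w_lst1).map (· + 0) = pInt word w_lst1 := by simp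
  rw [hmap]
  set q := pInt word w_lst1 with hq
  have hgaps : (q.zip (PySem.List.slice q (some 1) none)).map (fun ab => ab.2 - ab.1 - 1) = Dg q := by
    rw [PySem.List.slice_from_one]
    rfl
  rw [hgaps]
  rw [PySem.List.foldl_append_eq_flatMap]
  rw [PySem.List.len_eq, PySem.List.pyRange_one]
  simp only [Int.sub_zero, Int.toNat_natCast, List.flatMap_map, List.nil_append, OutOf]
  apply List.flatMap_congr
  intro j hj
  have : (0 : Int) + (j : Int) = ((j : Nat) : Int) := by ring
  rw [this, PySem.List.slice_from_natCast]

-- ===== VERDICT (by name: the statement is the Claim_ definition above) =====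
theorem get_spacings_spec : Claim_equal_get_spacings := by
  intro w_lst1 word _
  unfold Spec_get_spacings get_spacings
  rw [alt_eq, ← fRec_eq_OutOf]
  have := outer_fold word [] w_lst1 []
  simpa [PySem.List.len_eq] using this
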